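-- pv_equiv track=rewrite | github.com/Tristan3002/Plot2CurveAnderson | Plot2Curve.py | check_sd_best_match
-- ===== SOURCE A (Python) =====
-- def check_sd_best_match(seq, anti_sd="CCUCCU"):
--     seq_rna = seq.upper().replace('T', 'U')
--     anti_sd = anti_sd.upper()
--     pairs = {"A": "U", "U": "A", "G": "C", "C": "G"}
--     max_score = 0
--     for i in range(len(seq_rna) - len(anti_sd) + 1):
--         window = seq_rna[i:i+len(anti_sd)]
--         score = sum(1 for a, b in zip(window, anti_sd) if pairs.get(a) == b)
--         if score > max_score:
--             max_score = score
--     return max_score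
-- ===== SOURCE B (Python) =====
-- def check_sd_best_match(seq, anti_sd="CCUCCU"):
--     seq_rna = seq.upper().replace('T', 'U')
--     anti_sd = anti_sd.upper()
--     pairs = {"A": "U", "U": "A", "G": "C", "C": "G"}
--     w = len(seq_rna) - len(anti_sd) + 1
--     scores = [0] * w
--     for j in range(len(anti_sd)):
--         for k in range(w):
--             if pairs.get(seq_rna[k + j]) == anti_sd[j]:
--                 scores[k] += 1
--     return max(scores) if scores else 0
-- ===== Notes on version B (the rewrite author's own statement) =====
-- stated objective: alternative
-- what changed: B replaces A's per-window slice-and-sum scan (slice each window, zip with the motif, sum matches, track the max) by a per-offset score table: one pass over (sequence index, motif index) pairs accumulates match counts into a scores array indexed by window start, then a single max over the table.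
import Mathlib
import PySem

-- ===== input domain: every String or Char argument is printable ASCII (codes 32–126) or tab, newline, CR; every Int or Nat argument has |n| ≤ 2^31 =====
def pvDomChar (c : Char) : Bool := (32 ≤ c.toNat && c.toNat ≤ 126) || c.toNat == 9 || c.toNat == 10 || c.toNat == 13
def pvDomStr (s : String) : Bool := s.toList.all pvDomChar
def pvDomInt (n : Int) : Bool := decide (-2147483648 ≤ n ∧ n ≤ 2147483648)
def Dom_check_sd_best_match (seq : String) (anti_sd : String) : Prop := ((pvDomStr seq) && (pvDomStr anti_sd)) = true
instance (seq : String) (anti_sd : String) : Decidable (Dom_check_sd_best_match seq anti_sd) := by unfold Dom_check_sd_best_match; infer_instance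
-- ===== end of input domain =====

-- B replaces A's per-window slice-and-sum scan by one table of per-offset match counts
-- filled in a single pass over (position, motif-index) pairs, then a final max (objective: alternative).

-- ===== PORT A =====
def pvPairs : PySem.Dict Char Char :=
  PySem.Dict.ofList [('A', 'U'), ('U', 'A'), ('G', 'C'), ('C', 'G')]

def check_sd_best_match (seq : String) (anti_sd : String) : Int :=
  let seqRna := PySem.Chars.replace (PySem.Chars.upper seq.toList) ['T'] ['U']
  let asd := PySem.Chars.upper anti_sd.toList
  let n : Int := (seqRna.length : Int)
  let m : Int := (asd.length : Int)
  (PySem.List.pyRange 0 (n - m + 1) 1).foldl (fun maxScore i =>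
    let window := PySem.List.slice seqRna (some i) (some (i + m))
    let score : Int := ((window.zip asd).countP (fun ab => pvPairs.get? ab.1 == some ab.2) : Int)
    if score > maxScore then score else maxScore) 0

-- ===== PORT B =====
def check_sd_best_match_alt (seq : String) (anti_sd : String) : Int :=
  let seqRna := PySem.Chars.replace (PySem.Chars.upper seq.toList) ['T'] ['U']
  let asd := PySem.Chars.upper anti_sd.toList
  let w := seqRna.length + 1 - asd.length
  let scores0 : List Int := List.replicate w 0
  let scores := (List.range asd.length).foldl (fun sc j =>
    (List.range w).foldl (fun sc k =>
      if pvPairs.get? (seqRna.getD (k + j) ' ') == some (asd.getD j ' ')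
      then sc.set k (sc.getD k 0 + 1) else sc) sc) scores0
  match PySem.List.max? scores (fun y => y) with
  | some v => v
  | none => 0

-- ===== PRECONDITION & SPEC =====
def Spec_check_sd_best_match (seq : String) (anti_sd : String) (out : Int) : Prop := out = check_sd_best_match_alt seq anti_sd
instance (seq : String) (anti_sd : String) (out : Int) : Decidable (Spec_check_sd_best_match seq anti_sd out) := by unfold Spec_check_sd_best_match; infer_instance

-- ===== CLAIM (what is proved, stated in full; the proofs are below) =====
def Claim_equal_check_sd_best_match : Prop := ∀ (seq : String) (anti_sd : String), Dom_check_sd_best_match seq anti_sd → Spec_check_sd_best_match seq anti_sd (check_sd_best_match seq anti_sd)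

-- ===== LEMMAS AND PROOFS =====

-- match indicator and per-offset score used by both proof directions
def pvMatch (L P : List Char) (i j : Nat) : Bool :=
  pvPairs.get? (L.getD i ' ') == some (P.getD j ' ')

def pvScore (L P : List Char) (k : Nat) : Int :=
  ((List.range P.length).countP (fun j => pvMatch L P (k + j) j) : Int)

lemma foldl_foldl_flatMap {α β γ : Type} (l1 : List α) (l2 : α → List β)
    (f : γ → α → β → γ) (init : γ) :
    l1.foldl (fun s a => (l2 a).foldl (fun s b => f s a b) s) init
      = (l1.flatMap (fun a => (l2 a).map (fun b => (a, b)))).foldl (fun s p => f s p.1 p.2) init := by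
  induction l1 generalizing init with
  | nil => rfl
  | cons a t ih => simp [List.foldl_append, List.foldl_map, ih]

lemma length_foldl_set {α : Type} (l : List α) (pos : α → Nat) (c : α → Bool) (sc : List Int) :
    (l.foldl (fun s a => if c a then s.set (pos a) (s.getD (pos a) 0 + 1) else s) sc).length
      = sc.length := by
  induction l generalizing sc with
  | nil => rfl
  | cons a t ih =>
    rw [List.foldl_cons]
    by_cases h : c a
    · rw [if_pos h, ih, List.length_set]
    · rw [if_neg h, ih]

lemma getD_foldl_set_inc {α : Type} (l : List α) (pos : α → Nat) (c : α → Bool)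
    (sc : List Int) (hl : ∀ a ∈ l, c a = true → pos a < sc.length) (k : Nat) :
    ((l.foldl (fun s a => if c a then s.set (pos a) (s.getD (pos a) 0 + 1) else s) sc).getD k 0)
      = sc.getD k 0 + (l.countP (fun a => c a && pos a == k) : Int) := by
  induction l generalizing sc with
  | nil => simp
  | cons a t ih =>
    rw [List.foldl_cons, List.countP_cons]
    by_cases h : c a
    · rw [if_pos h]
      have hpos : pos a < sc.length := hl a (by simp) h
      rw [ih _ (fun x hx hc => by rw [List.length_set]; exact hl x (List.mem_cons_of_mem _ hx) hc)]
      by_cases hk : pos a = k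
      · simp only [List.getD_eq_getElem?_getD, List.getElem?_set, hk, h]
        simp [← hk, hpos]
        ring
      · simp only [List.getD_eq_getElem?_getD, List.getElem?_set, h]
        simp [hk]
    · rw [if_neg h]
      rw [ih _ (fun x hx hc => hl x (List.mem_cons_of_mem _ hx) hc)]
      simp [h]

lemma countP_flatMap_sum {α β : Type} (l : List α) (g : α → List β) (p : β → Bool) :
    ((l.flatMap g).countP p : Int) = ((l.map (fun a => ((g a).countP p : Int))).sum) := by
  induction l with
  | nil => simp
  | cons a t ih => simp [List.countP_append, ih]

lemma countP_zip_eq (w p : List Char) (f : Char → Char → Bool) (h : p.length ≤ w.length) :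
    (w.zip p).countP (fun ab => f ab.1 ab.2)
      = (List.range p.length).countP (fun j => f (w.getD j ' ') (p.getD j ' ')) := by
  induction p generalizing w with
  | nil => simp
  | cons x t ih =>
    cases w with
    | nil => simp at h
    | cons y ws =>
      simp only [List.zip_cons_cons, List.countP_cons, List.length_cons,
        List.range_succ_eq_map, List.countP_map]
      rw [ih ws (by simpa using h)]
      simp [Function.comp_def]

lemma fold_max_eq_max? (xs : List Int) (h : ∀ x ∈ xs, 0 ≤ x) :
    xs.foldl (fun mx s => if s > mx then s else mx) 0
      = (match PySem.List.max? xs (fun y => y) with | some v => v | none => 0) := by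
  have hfun : (fun (mx s : Int) => if s > mx then s else mx) = fun mx s => max mx s := by
    funext mx s; split_ifs with hs <;> omega
  cases xs with
  | nil => simp [PySem.List.max?]
  | cons x t =>
    rw [hfun, PySem.List.max?_id_cons]
    have hx : max 0 x = x := by have := h x (by simp); omega
    simp [hx]

lemma countP_int_eq_sum {α : Type} (l : List α) (q : α → Bool) :
    ((l.countP q : Nat) : Int) = (l.map (fun x => if q x then (1:Int) else 0)).sum := by
  induction l with
  | nil => simp
  | cons a t ih => by_cases h : q a <;> simp [h, ih, add_comm]

lemma sum_map_range_eq_finset (n : Nat) (f : Nat → Int) :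
    ((List.range n).map f).sum = ∑ i ∈ Finset.range n, f i := by
  induction n with
  | zero => simp
  | succ n ih => simp [List.range_succ, Finset.sum_range_succ, ih]

lemma countP_range_single (w k : Nat) (q : Nat → Bool) (hk : k < w) :
    (((List.range w).countP (fun k' => q k' && (k' == k)) : Nat) : Int)
      = if q k then 1 else 0 := by
  rw [countP_int_eq_sum, sum_map_range_eq_finset]
  have key : ∀ k' : Nat, (if q k' && (k' == k) then (1:Int) else 0)
      = if k' = k then (if q k' then (1:Int) else 0) else 0 := by
    intro k'
    by_cases h : k' = k
    · subst h; by_cases hq : q k' <;> simp [hq]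
    · simp [h]
  simp only [key]
  rw [Finset.sum_ite_eq' (Finset.range w) k (fun k' => if q k' then (1:Int) else 0)]
  simp [hk]

lemma flatten_spec (L P : List Char) (init : List Int) :
    (List.range P.length).foldl (fun sc j =>
        (List.range (L.length + 1 - P.length)).foldl (fun sc k =>
          if pvMatch L P (k + j) j then sc.set k (sc.getD k 0 + 1) else sc) sc) init
      = ((List.range P.length).flatMap
          (fun j => (List.range (L.length + 1 - P.length)).map (fun k => (j, k)))).foldl
          (fun sc p => if pvMatch L P (p.2 + p.1) p.1 then sc.set p.2 (sc.getD p.2 0 + 1) else sc)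
          init :=
  foldl_foldl_flatMap _ _
    (fun sc j k => if pvMatch L P (k + j) j then sc.set k (sc.getD k 0 + 1) else sc) init

lemma scores_eq (L P : List Char) :
    ((List.range P.length).foldl (fun (sc : List Int) j =>
        (List.range (L.length + 1 - P.length)).foldl (fun sc k =>
          if pvPairs.get? (L.getD (k + j) ' ') == some (P.getD j ' ')
          then sc.set k (sc.getD k 0 + 1) else sc) sc)
        (List.replicate (L.length + 1 - P.length) (0:Int)))
      = (List.range (L.length + 1 - P.length)).map (pvScore L P) := by
  simp only [show ∀ i j : Nat,
      (pvPairs.get? (L.getD i ' ') == some (P.getD j ' ')) = pvMatch L P i j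
    from fun _ _ => rfl]
  rw [flatten_spec]
  have hmem : ∀ p ∈ (List.range P.length).flatMap
      (fun j => (List.range (L.length + 1 - P.length)).map (fun k => (j, k))),
      (fun p : Nat × Nat => pvMatch L P (p.2 + p.1) p.1) p = true →
        (fun p : Nat × Nat => p.2) p < (List.replicate (L.length + 1 - P.length) (0:Int)).length := by
    intro p hp _
    simp only [List.mem_flatMap, List.mem_map, List.mem_range] at hp
    obtain ⟨j, hj, k, hk, rfl⟩ := hp
    simpa using hk
  apply List.ext_getElem
  · rw [length_foldl_set _ (fun p : Nat × Nat => p.2)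
      (fun p : Nat × Nat => pvMatch L P (p.2 + p.1) p.1)]
    simp
  · intro k h1' h2'
    have h1 : k < L.length + 1 - P.length := by
      rw [length_foldl_set _ (fun p : Nat × Nat => p.2)
        (fun p : Nat × Nat => pvMatch L P (p.2 + p.1) p.1),
        List.length_replicate] at h1'
      exact h1'
    have hgd := getD_foldl_set_inc
      ((List.range P.length).flatMap
        (fun j => (List.range (L.length + 1 - P.length)).map (fun k => (j, k))))
      (fun p : Nat × Nat => p.2) (fun p : Nat × Nat => pvMatch L P (p.2 + p.1) p.1)
      (List.replicate (L.length + 1 - P.length) (0:Int)) hmem k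
    have hrep : (List.replicate (L.length + 1 - P.length) (0:Int)).getD k 0 = 0 := by
      simp [List.getD_eq_getElem?_getD, h1]
    rw [hrep, zero_add, countP_flatMap_sum] at hgd
    simp only [List.countP_map, Function.comp_def] at hgd
    have hsingle : ∀ j : Nat,
        ((List.countP (fun k' => pvMatch L P (k' + j) j && (k' == k))
            (List.range (L.length + 1 - P.length)) : Nat) : Int)
          = if pvMatch L P (k + j) j then 1 else 0 :=
      fun j => countP_range_single _ k (fun k' => pvMatch L P (k' + j) j) h1
    simp only [hsingle] at hgd
    have hscore : ((List.range P.length).map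
        (fun j => if pvMatch L P (k + j) j then (1:Int) else 0)).sum = pvScore L P k := by
      rw [pvScore, countP_int_eq_sum]
    rw [hscore] at hgd
    simp only [List.getElem_map, List.getElem_range]
    rw [← hgd, List.getD_eq_getElem?_getD, List.getElem?_eq_getElem h1']
    rfl

lemma windowScore_eq (L P : List Char) (k : Nat) (hk : k < L.length + 1 - P.length) :
    (((PySem.List.slice L (some ((k:Nat):Int)) (some (((k:Nat):Int) + ((P.length:Nat):Int)))).zip P).countP
        (fun ab => pvPairs.get? ab.1 == some ab.2) : Int)
      = pvScore L P k := by
  rw [PySem.List.slice_natCast_add]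
  rw [countP_zip_eq _ _ (fun a b => pvPairs.get? a == some b)
      (by simp [List.length_take, List.length_drop]; omega)]
  rw [pvScore]
  congr 1
  apply List.countP_congr
  intro j hj
  simp only [List.mem_range] at hj
  have hgd : ((L.drop k).take P.length).getD j ' ' = L.getD (k + j) ' ' := by
    simp [List.getD_eq_getElem?_getD, hj, List.getElem?_drop]
  rw [hgd, pvMatch]

theorem check_sd_best_match_spec : Claim_equal_check_sd_best_match := by
  intro seq anti_sd _
  unfold Spec_check_sd_best_match check_sd_best_match check_sd_best_match_alt
  dsimp only
  rw [scores_eq]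
  set L := PySem.Chars.replace (PySem.Chars.upper seq.toList) ['T'] ['U'] with hLdef
  set P := PySem.Chars.upper anti_sd.toList with hPdef
  have hw : (((L.length:Nat):Int) - ((P.length:Nat):Int) + 1 - 0).toNat = L.length + 1 - P.length := by
    omega
  rw [PySem.List.pyRange_one, hw]
  rw [List.foldl_map]
  refine Eq.trans (PySem.List.foldl_congr_mem _ _ (fun (mx : Int) (k : Nat) =>
      if pvScore L P k > mx then pvScore L P k else mx) _ ?_) ?_
  · intro acc k hkmem
    simp only [List.mem_range] at hkmem
    simp only [zero_add]
    rw [windowScore_eq L P k hkmem]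
  · rw [← fold_max_eq_max? ((List.range (L.length + 1 - P.length)).map (pvScore L P)) (by
      intro x hx
      simp only [List.mem_map] at hx
      obtain ⟨k, -, rfl⟩ := hx
      simp [pvScore])]
    rw [List.foldl_map]
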